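-- pv_equiv track=rewrite | github.com/qMSUZ/EntDetector | entdetector.py | make_partititon_as_list
-- ===== SOURCE A (Python) =====
-- def make_partititon_as_list(kappa):
--         n=len(kappa)
--         m=max(kappa)
--         fstr=[]
--         for j in range(0, m+1):
--                 string=[]
--                 for i in range(0,n):
--                         if kappa[i]==j:
--                                 string=string+[i]
--                 fstr=fstr + [string]
--         return fstr
-- ===== SOURCE B (Python) =====
-- def make_partititon_as_list(kappa):
--         groups = {}
--         for i, v in enumerate(kappa):
--                 groups.setdefault(v, []).append(i)
--         return [groups.get(j, []) for j in range(max(kappa) + 1)]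
-- ===== Notes on version B (the rewrite author's own statement) =====
-- stated objective: faster
-- what changed: Replaces the nested loop over every value j in 0..max with a full scan per j (O(n*m)) by one dict-grouping pass over kappa followed by a lookup per bucket; Pre_ excludes only the empty list, on which A raises ValueError (max of empty sequence).
import Mathlib
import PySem

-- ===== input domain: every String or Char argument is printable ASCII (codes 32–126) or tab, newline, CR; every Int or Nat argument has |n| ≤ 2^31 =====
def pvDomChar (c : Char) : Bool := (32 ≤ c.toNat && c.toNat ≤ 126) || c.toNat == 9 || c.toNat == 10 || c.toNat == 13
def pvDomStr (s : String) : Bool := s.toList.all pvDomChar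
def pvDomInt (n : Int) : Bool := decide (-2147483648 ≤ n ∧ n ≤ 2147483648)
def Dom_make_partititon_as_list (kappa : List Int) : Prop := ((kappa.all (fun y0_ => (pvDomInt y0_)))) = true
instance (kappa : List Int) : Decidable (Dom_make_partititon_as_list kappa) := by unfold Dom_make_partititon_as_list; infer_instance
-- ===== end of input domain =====

-- B replaces A's nested scan (one pass over kappa for every bucket j in 0..max, O(n*m))
-- by one dict-grouping pass over kappa plus a lookup per bucket (O(n+m)).

-- ===== PORT A =====
def make_partititon_as_list (kappa : List Int) : List (List Int) :=
  let n : Int := kappa.length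
  let m : Int := (PySem.List.max? kappa (fun y => y)).getD 0
  (PySem.List.pyRange 0 (m + 1) 1).foldl
    (fun fstr j =>
      fstr ++ [(PySem.List.pyRange 0 n 1).foldl
        (fun s i => if PySem.List.pyGetD kappa i 0 = j then s ++ [i] else s) []])
    []

-- ===== PORT B =====
def make_partititon_as_list_alt (kappa : List Int) : List (List Int) :=
  let groups : PySem.Dict Int (List Int) :=
    (PySem.List.enumerate kappa 0).foldl
      (fun d p => d.modify p.2 [] (fun l => l ++ [p.1]))   -- groups.setdefault(v, []).append(i)
      PySem.Dict.empty
  let m : Int := (PySem.List.max? kappa (fun y => y)).getD 0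
  (PySem.List.pyRange 0 (m + 1) 1).map (fun j => groups.getD j [])

-- ===== PRECONDITION & SPEC =====
-- Pre_ excludes only the empty list, on which Python A raises ValueError (max of empty sequence).
def Pre_make_partititon_as_list (kappa : List Int) : Prop := kappa ≠ []
instance (kappa : List Int) : Decidable (Pre_make_partititon_as_list kappa) := by
  unfold Pre_make_partititon_as_list; infer_instance

def pvWitness_make_partititon_as_list : List Int := [1, 0, 2, 1]

def Spec_make_partititon_as_list (kappa : List Int) (out : List (List Int)) : Prop :=
  out = make_partititon_as_list_alt kappa
instance (kappa : List Int) (out : List (List Int)) : Decidable (Spec_make_partititon_as_list kappa out) := by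
  unfold Spec_make_partititon_as_list; infer_instance

-- ===== CLAIM (what is proved, stated in full; the proofs are below) =====
def Claim_equal_make_partititon_as_list : Prop :=
  ∀ (kappa : List Int), Dom_make_partititon_as_list kappa →
    Pre_make_partititon_as_list kappa →
    Spec_make_partititon_as_list kappa (make_partititon_as_list kappa)

-- ===== LEMMAS AND PROOFS =====

/-- A's inner loop over positions, rewritten as a filter-map over `enumerate`. -/
theorem inner_loop_eq (kappa : List Int) (j : Int) :
    (PySem.List.pyRange 0 ((kappa.length : Int)) 1).foldl
        (fun s i => if PySem.List.pyGetD kappa i 0 = j then s ++ [i] else s) []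
      = ((PySem.List.enumerate kappa 0).filter (fun p => decide (p.2 = j))).map (fun p => p.1) := by
  have he := PySem.List.enumerate_eq_map_pyRange kappa (0 : Int)
  simp only [PySem.List.len_eq] at he
  have hf : (PySem.List.pyRange 0 ((kappa.length : Int)) 1).foldl
      (fun s i => if PySem.List.pyGetD kappa i 0 = j then s ++ [i] else s) []
      = (PySem.List.enumerate kappa 0).foldl
          (fun (s : List Int) (p : Int × Int) => if p.2 = j then s ++ [p.1] else s) [] := by
    rw [he, List.foldl_map]
  rw [hf, PySem.List.foldl_append_ite (p := fun p : Int × Int => p.2 = j) (f := fun p => p.1),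
    List.nil_append]

/-- B's bucket lookup in the grouping dict, rewritten as the same filter-map. -/
theorem bucket_eq (kappa : List Int) (j : Int) :
    ((PySem.List.enumerate kappa 0).foldl
        (fun d p => d.modify p.2 [] (fun l => l ++ [p.1])) PySem.Dict.empty).getD j []
      = ((PySem.List.enumerate kappa 0).filter (fun p => decide (p.2 = j))).map (fun p => p.1) := by
  have hswap :
      (PySem.List.enumerate kappa 0).foldl
          (fun d p => d.modify p.2 [] (fun l => l ++ [p.1])) PySem.Dict.empty
        = ((PySem.List.enumerate kappa 0).map Prod.swap).foldl
            (fun d p => d.modify p.1 [] (fun l => l ++ [p.2])) PySem.Dict.empty := by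
    rw [List.foldl_map]; rfl
  rw [hswap, PySem.Dict.getD_foldl_modify_append, PySem.Dict.getD_empty, List.nil_append,
    List.filter_map, List.map_map]
  apply congrArg
  apply List.filter_congr
  intro p _
  by_cases h : p.2 = j <;> simp [h]

-- ===== VERDICT (by name: the statement is the Claim_ definition above) =====
theorem make_partititon_as_list_spec : Claim_equal_make_partititon_as_list := by
  intro kappa _ _
  unfold Spec_make_partititon_as_list make_partititon_as_list make_partititon_as_list_alt
  simp only []
  rw [PySem.List.foldl_append_singleton_eq_map, List.nil_append]
  apply List.map_congr_left
  intro j _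
  rw [inner_loop_eq, bucket_eq]
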